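-- pv_equiv track=rewrite | github.com/onealmond/hacking-lab | google-ctf-2019/jit/shellcode.py | find_valid_unicode_jump
-- ===== SOURCE A (Python) =====
-- def intbracket(s):
--     ret = 0
--     for c in s:
--         ret = ret * 10 + ord(c) - 0x30
--     return ret
--
-- def find_valid_unicode_jump(instrno):
--     prefix = ''
--     ret = ''
--
--     for k in range(10):
--         for i in range(100):
--             ret = prefix + str(i)
--             out = (intbracket(ret) - instrno) * 5 - 5
--             byte = out & 0xff
--             if byte == 0x01:
--                 """workaround of encoding issue"""
--                 return '\uff10' * k + str(i) #str(ret.encode()[ret.encode().rfind(b'\x90')+1:].decode())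
--                 #return ret
--         prefix += "\xef\xbc\x90" # '\uff10'.encode()
--         #prefix += '\uff10'
--     return None
-- ===== SOURCE B (Python) =====
-- def find_valid_unicode_jump(instrno):
--     # solve the congruence directly: the searched value V must satisfy V == instrno + 206 (mod 256)
--     T = (instrno + 206) % 256
--     base = 0  # intbracket of the current prefix ('\xef\xbc\x90' * k)
--     for k in range(10):
--         r1 = (T - base * 10) % 256
--         if r1 < 10:
--             return '\uff10' * k + str(r1)
--         r2 = (T - base * 100) % 256
--         if 10 <= r2 < 100:
--             return '\uff10' * k + str(r2)
--         base = base * 1000 + 20596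
--     return None
-- ===== Notes on version B (the rewrite author's own statement) =====
-- stated objective: simpler
-- what changed: Replaces the inner brute-force scan of i in 0..99 per prefix by directly solving the congruence (base*10^d + i) == instrno + 206 (mod 256) for the single-digit and two-digit candidate, and maintains intbracket of the prefix by the recurrence base = base*1000 + 20596 instead of re-scanning the string.
import Mathlib
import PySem

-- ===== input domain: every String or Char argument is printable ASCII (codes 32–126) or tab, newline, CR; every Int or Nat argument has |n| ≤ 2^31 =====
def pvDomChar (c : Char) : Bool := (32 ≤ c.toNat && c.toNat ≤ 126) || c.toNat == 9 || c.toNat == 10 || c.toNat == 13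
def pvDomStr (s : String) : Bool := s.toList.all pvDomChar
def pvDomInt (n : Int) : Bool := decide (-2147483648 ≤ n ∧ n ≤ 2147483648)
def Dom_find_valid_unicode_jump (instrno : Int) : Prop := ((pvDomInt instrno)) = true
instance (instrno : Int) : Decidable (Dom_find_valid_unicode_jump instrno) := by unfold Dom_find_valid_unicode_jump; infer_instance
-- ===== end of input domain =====

-- B replaces A's 100-iteration inner brute-force scan per prefix with a direct solution of the
-- congruence V ≡ instrno + 206 (mod 256) (objective: simpler / fewer operations per prefix).

-- ===== PORT A =====
-- intbracket over the characters of the string (strings are ported as List Char; ord c = c.toNat)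
def intbracket (s : List Char) : Int :=
  s.foldl (fun ret c => ret * 10 + (c.toNat : Int) - 0x30) 0

-- body of A's inner-loop test: 'out & 0xff == 0x01' (Python '&' is PySem.Int.band, exact on negatives)
def fvuA_hit (pfx : List Char) (instrno : Int) (i : Int) : Bool :=
  PySem.Int.band ((intbracket (pfx ++ PySem.Int.toChars i) - instrno) * 5 - 5) 255 == 0x01

-- outer 'for k in range(10)' with the growing prefix; the inner 'for i in range(100)' with early
-- return is the first i of the range satisfying the test (List.find?)
def fvuA_loop (instrno : Int) : List Int → List Char → Option String
  | [], _ => none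
  | k :: ks, pfx =>
    match (PySem.List.pyRange 0 100 1).find? (fvuA_hit pfx instrno) with
    | some i => some (String.ofList (PySem.List.pyRepeat ['\uff10'] k ++ PySem.Int.toChars i))
    | none => fvuA_loop instrno ks (pfx ++ ['\u00ef', '\u00bc', '\u0090'])

def find_valid_unicode_jump (instrno : Int) : Option String :=
  fvuA_loop instrno (PySem.List.pyRange 0 10 1) []

-- ===== PORT B =====
-- B's loop: base = intbracket of the current prefix, maintained by the recurrence
-- base := base*1000 + 20596; r1/r2 are the unique single-/double-digit solutions mod 256
def fvuB_loop (T : Int) : List Int → Int → Option String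
  | [], _ => none
  | k :: ks, base =>
    let r1 := PySem.Int.mod (T - base * 10) 256
    if r1 < 10 then
      some (String.ofList (PySem.List.pyRepeat ['\uff10'] k ++ PySem.Int.toChars r1))
    else
      let r2 := PySem.Int.mod (T - base * 100) 256
      if 10 ≤ r2 ∧ r2 < 100 then
        some (String.ofList (PySem.List.pyRepeat ['\uff10'] k ++ PySem.Int.toChars r2))
      else fvuB_loop T ks (base * 1000 + 20596)

def find_valid_unicode_jump_alt (instrno : Int) : Option String :=
  fvuB_loop (PySem.Int.mod (instrno + 206) 256) (PySem.List.pyRange 0 10 1) 0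

-- ===== PRECONDITION & SPEC =====
def Spec_find_valid_unicode_jump (instrno : Int) (out : Option String) : Prop := out = find_valid_unicode_jump_alt instrno
instance (instrno : Int) (out : Option String) : Decidable (Spec_find_valid_unicode_jump instrno out) := by unfold Spec_find_valid_unicode_jump; infer_instance

-- ===== CLAIM (what is proved, stated in full; the proofs are below) =====
def Claim_equal_find_valid_unicode_jump : Prop := ∀ (instrno : Int), Dom_find_valid_unicode_jump instrno → Spec_find_valid_unicode_jump instrno (find_valid_unicode_jump instrno)

-- ===== LEMMAS AND PROOFS =====

-- Python's x & 0xff is the floor-mod by 256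
theorem fvu_band255 (x : Int) : PySem.Int.band x 255 = x % 256 := by
  unfold PySem.Int.band
  norm_num
  split_ifs with h1
  · have h := Nat.and_two_pow_sub_one_eq_mod x.toNat 8
    norm_num at h
    rw [show (Int.toNat 255) = 255 from rfl, h]
    omega
  · have h := Nat.and_two_pow_sub_one_eq_mod ((-x).toNat - 1) 8
    norm_num at h
    rw [show (Int.toNat 255) = 255 from rfl, Nat.and_comm 255 _, h]
    omega

-- A's inner test only depends on instrno modulo 256
theorem fvu_hit_congr (pfx : List Char) (n m i : Int) (h : n % 256 = m % 256) :
    fvuA_hit pfx n i = fvuA_hit pfx m i := by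
  unfold fvuA_hit
  rw [fvu_band255, fvu_band255]
  have : (intbracket (pfx ++ PySem.Int.toChars i) - n) * 5 - 5 ≡
      (intbracket (pfx ++ PySem.Int.toChars i) - m) * 5 - 5 [ZMOD 256] := by
    have : ((intbracket (pfx ++ PySem.Int.toChars i) - n) * 5 - 5) % 256 =
        ((intbracket (pfx ++ PySem.Int.toChars i) - m) * 5 - 5) % 256 := by omega
    exact this
  rw [this]

-- hence so does A's whole loop
theorem fvu_loopA_congr (n m : Int) (h : n % 256 = m % 256) (ks : List Int) :
    ∀ pfx, fvuA_loop n ks pfx = fvuA_loop m ks pfx := by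
  induction ks with
  | nil => intro pfx; rfl
  | cons k ks ih =>
    intro pfx
    simp only [fvuA_loop]
    rw [show fvuA_hit pfx n = fvuA_hit pfx m from funext fun i => fvu_hit_congr pfx n m i h]
    cases (PySem.List.pyRange 0 100 1).find? (fvuA_hit pfx m) with
    | some i => rfl
    | none => simp only; exact ih _

theorem fvu_A_period (n : Int) : find_valid_unicode_jump n = find_valid_unicode_jump (n % 256) := by
  unfold find_valid_unicode_jump
  exact fvu_loopA_congr n (n % 256) (by omega) _ []

theorem fvu_B_period (n : Int) : find_valid_unicode_jump_alt n = find_valid_unicode_jump_alt (n % 256) := by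
  unfold find_valid_unicode_jump_alt
  have : PySem.Int.mod (n + 206) 256 = PySem.Int.mod (n % 256 + 206) 256 := by
    simp only [PySem.Int.mod_eq_emod_of_pos (show (0:Int) < 256 by norm_num)]
    omega
  rw [this]

-- the 256 residues, checked by computation
set_option maxHeartbeats 10000000 in
set_option maxRecDepth 10000 in
theorem fvu_table :
    (List.range 256).all
      (fun m => find_valid_unicode_jump (m : Int) == find_valid_unicode_jump_alt (m : Int)) = true := by
  decide

-- ===== VERDICT (by name: the statement is the Claim_ definition above) =====
theorem find_valid_unicode_jump_spec : Claim_equal_find_valid_unicode_jump := by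
  intro n _
  unfold Spec_find_valid_unicode_jump
  rw [fvu_A_period n, fvu_B_period n]
  have hmem : (n % 256).toNat ∈ List.range 256 := by
    rw [List.mem_range]; omega
  have h := List.all_eq_true.mp fvu_table _ hmem
  have hc : (((n % 256).toNat : Int)) = n % 256 := by omega
  rw [hc] at h
  exact beq_iff_eq.mp h
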